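-- pv_equiv track=rewrite | github.com/limits220284/CP | leetcode/2972.统计移除递增子数组的数目 II.py | incremovableSubarrayCount
-- ===== SOURCE A (Python) =====
-- from typing import List
--
-- def incremovableSubarrayCount(nums: List[int]) -> int:
--     n = len(nums)
--     l, r = 0, n - 1
--     while l < n - 1 and nums[l] < nums[l + 1]:
--         l += 1
--     while r > 0 and nums[r] > nums[r - 1]:
--         r -= 1
--     if r <= l:
--         return n * (n + 1) // 2
--     ans = 0
--     ll, rr = 0, r
--     while ll <= l and ll < rr:
--         while rr < n and nums[rr] <= nums[ll]:
--             rr += 1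
--         ans += (n - rr)
--         ll += 1
--     ans += l + 1
--     ans += n - r
--     return ans + 1
-- ===== SOURCE B (Python) =====
-- from bisect import bisect_right
-- from typing import List
--
-- def incremovableSubarrayCount(nums: List[int]) -> int:
--     n = len(nums)
--     l = 0
--     while l < n - 1 and nums[l] < nums[l + 1]:
--         l += 1
--     r = n - 1
--     while r > 0 and nums[r] > nums[r - 1]:
--         r -= 1
--     if r <= l:
--         return n * (n + 1) // 2
--     # For each prefix end i, binary-search the increasing suffix for the first
--     # element > nums[i]; everything from there on is a valid right part.
--     suf = nums[r:]
--     ans = sum(len(suf) - bisect_right(suf, nums[i]) for i in range(l + 1))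
--     return ans + (l + 1) + (n - r) + 1
-- ===== Notes on version B (the rewrite author's own statement) =====
-- stated objective: alternative
-- what changed: The forward-only two-pointer counting loop (an inner linear scan advancing rr) is replaced by an independent binary search (bisect_right) over the increasing suffix for each prefix index; prefix/suffix boundary scans and the additive terms are kept.
import Mathlib
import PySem

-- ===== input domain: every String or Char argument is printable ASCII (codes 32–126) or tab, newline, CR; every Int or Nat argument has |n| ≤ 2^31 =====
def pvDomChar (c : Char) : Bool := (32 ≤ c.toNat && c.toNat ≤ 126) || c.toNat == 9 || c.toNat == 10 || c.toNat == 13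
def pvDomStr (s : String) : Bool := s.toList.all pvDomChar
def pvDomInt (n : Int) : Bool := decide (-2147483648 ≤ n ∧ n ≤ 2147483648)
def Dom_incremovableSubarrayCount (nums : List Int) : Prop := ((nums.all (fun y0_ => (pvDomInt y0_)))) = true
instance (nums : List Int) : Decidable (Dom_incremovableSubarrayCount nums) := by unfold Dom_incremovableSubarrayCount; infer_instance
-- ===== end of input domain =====

-- B replaces A's two-pointer counting loop by an independent bisect_right over the
-- increasing suffix per prefix index (alternative decomposition, same results).


-- ===== PORT A =====
-- while l < n - 1 and nums[l] < nums[l + 1]: l += 1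
def pvA_l (nums : List Int) (n l : Int) : Int :=
  if h : l < n - 1 ∧ PySem.List.pyGetD nums l 0 < PySem.List.pyGetD nums (l + 1) 0 then
    pvA_l nums n (l + 1)
  else l
termination_by (n - 1 - l).toNat
decreasing_by omega

-- while r > 0 and nums[r] > nums[r - 1]: r -= 1
def pvA_r (nums : List Int) (r : Int) : Int :=
  if h : r > 0 ∧ PySem.List.pyGetD nums r 0 > PySem.List.pyGetD nums (r - 1) 0 then
    pvA_r nums (r - 1)
  else r
termination_by r.toNat
decreasing_by omega

-- while rr < n and nums[rr] <= nums[ll]: rr += 1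
def pvA_rr (nums : List Int) (n ll rr : Int) : Int :=
  if h : rr < n ∧ PySem.List.pyGetD nums rr 0 ≤ PySem.List.pyGetD nums ll 0 then
    pvA_rr nums n ll (rr + 1)
  else rr
termination_by (n - rr).toNat
decreasing_by omega

-- while ll <= l and ll < rr: (inner while); ans += n - rr; ll += 1
def pvA_loop (nums : List Int) (n l ll rr ans : Int) : Int :=
  if h : ll ≤ l ∧ ll < rr then
    let rr' := pvA_rr nums n ll rr
    pvA_loop nums n l (ll + 1) rr' (ans + (n - rr'))
  else ans
termination_by (l + 1 - ll).toNat
decreasing_by omega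

def incremovableSubarrayCount (nums : List Int) : Int :=
  let n : Int := nums.length
  let l := pvA_l nums n 0
  let r := pvA_r nums (n - 1)
  if r ≤ l then PySem.Int.floordiv (n * (n + 1)) 2
  else
    let ans := pvA_loop nums n l 0 r 0
    ans + (l + 1) + (n - r) + 1

-- ===== PORT B =====
def pvB_l (nums : List Int) (n l : Int) : Int :=
  if h : l < n - 1 ∧ PySem.List.pyGetD nums l 0 < PySem.List.pyGetD nums (l + 1) 0 then
    pvB_l nums n (l + 1)
  else l
termination_by (n - 1 - l).toNat
decreasing_by omega

def pvB_r (nums : List Int) (r : Int) : Int :=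
  if h : r > 0 ∧ PySem.List.pyGetD nums r 0 > PySem.List.pyGetD nums (r - 1) 0 then
    pvB_r nums (r - 1)
  else r
termination_by r.toNat
decreasing_by omega

def incremovableSubarrayCount_alt (nums : List Int) : Int :=
  let n : Int := nums.length
  let l := pvB_l nums n 0
  let r := pvB_r nums (n - 1)
  if r ≤ l then PySem.Int.floordiv (n * (n + 1)) 2
  else
    let suf := PySem.List.slice nums (some r) none
    let ans := (PySem.List.pyRange 0 (l + 1) 1).foldl
      (fun acc i =>
        acc + ((suf.length : Int) - (PySem.List.bisectRight suf (PySem.List.pyGetD nums i 0) : Int))) 0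
    ans + (l + 1) + (n - r) + 1

-- ===== PRECONDITION & SPEC =====
def Spec_incremovableSubarrayCount (nums : List Int) (out : Int) : Prop := out = incremovableSubarrayCount_alt nums
instance (nums : List Int) (out : Int) : Decidable (Spec_incremovableSubarrayCount nums out) := by unfold Spec_incremovableSubarrayCount; infer_instance

-- ===== CLAIM (what is proved, stated in full; the proofs are below) =====
def Claim_equal_incremovableSubarrayCount : Prop := ∀ (nums : List Int), Dom_incremovableSubarrayCount nums → Spec_incremovableSubarrayCount nums (incremovableSubarrayCount nums)

-- ===== LEMMAS AND PROOFS =====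


theorem pvA_l_spec (nums : List Int) (n l : Int) :
    l ≤ pvA_l nums n l ∧ pvA_l nums n l ≤ max l (n - 1) ∧
      ∀ i : Int, l ≤ i → i < pvA_l nums n l →
        PySem.List.pyGetD nums i 0 < PySem.List.pyGetD nums (i + 1) 0 := by
  rw [pvA_l]
  split
  · rename_i h
    have ih := pvA_l_spec nums n (l + 1)
    refine ⟨by omega, by omega, ?_⟩
    intro i hi1 hi2
    rcases (by omega : i = l ∨ l + 1 ≤ i) with rfl | hge
    · exact h.2
    · exact ih.2.2 i hge hi2
  · exact ⟨le_refl l, by omega, by omega⟩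
termination_by (n - 1 - l).toNat
decreasing_by omega

theorem pvA_r_spec (nums : List Int) (r : Int) :
    pvA_r nums r ≤ r ∧ (0 ≤ r → 0 ≤ pvA_r nums r) ∧
      ∀ i : Int, pvA_r nums r < i → i ≤ r →
        PySem.List.pyGetD nums (i - 1) 0 < PySem.List.pyGetD nums i 0 := by
  rw [pvA_r]
  split
  · rename_i h
    have ih := pvA_r_spec nums (r - 1)
    refine ⟨by omega, by omega, ?_⟩
    intro i hi1 hi2
    rcases (by omega : i = r ∨ i ≤ r - 1) with rfl | hle
    · exact h.2
    · exact ih.2.2 i hi1 hle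
  · exact ⟨le_refl r, by omega, by omega⟩
termination_by r.toNat
decreasing_by omega

theorem pvA_rr_spec (nums : List Int) (n ll rr : Int) :
    rr ≤ pvA_rr nums n ll rr ∧ pvA_rr nums n ll rr ≤ max rr n ∧
      (∀ m : Int, rr ≤ m → m < pvA_rr nums n ll rr →
        PySem.List.pyGetD nums m 0 ≤ PySem.List.pyGetD nums ll 0) ∧
      (¬ pvA_rr nums n ll rr < n ∨
        PySem.List.pyGetD nums ll 0 < PySem.List.pyGetD nums (pvA_rr nums n ll rr) 0) := by
  rw [pvA_rr]
  split
  · rename_i h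
    have ih := pvA_rr_spec nums n ll (rr + 1)
    refine ⟨by omega, by omega, ?_, ih.2.2.2⟩
    intro m hm1 hm2
    rcases (by omega : m = rr ∨ rr + 1 ≤ m) with rfl | hge
    · exact h.2
    · exact ih.2.2.1 m hge hm2
  · rename_i h
    exact ⟨le_refl rr, by omega, by omega, by omega⟩
termination_by (n - rr).toNat
decreasing_by omega

theorem pv_getD_drop (nums : List Int) (R : Int) (hR : 0 ≤ R) (j : Nat)
    (hj : j < (nums.drop R.toNat).length) :
    (nums.drop R.toNat)[j] = PySem.List.pyGetD nums (R + j) 0 := by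
  have hlen := List.length_drop (l := nums) (i := R.toNat)
  have h1 : (0:Int) ≤ R + j := by omega
  have h2 : R + (j:Int) < (nums.length : Int) := by omega
  rw [PySem.List.pyGetD_eq_getElem nums 0 h1 h2, List.getElem_drop]
  congr 1
  omega

theorem pv_pairwise_le_of_adj (xs : List Int)
    (h : ∀ (j : Nat) (hj : j + 1 < xs.length), xs[j] < xs[j + 1]) :
    xs.Pairwise (fun a b => a ≤ b) := by
  rw [List.pairwise_iff_getElem]
  have key : ∀ (d i : Nat) (hd : i + d < xs.length), xs[i]'(by omega) ≤ xs[i + d] := by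
    intro d
    induction d with
    | zero => intro i hd; simp
    | succ d ih =>
      intro i hd
      have e : i + (d + 1) = (i + d) + 1 := by omega
      have h1 : xs[i]'(by omega) ≤ xs[i + d]'(by omega) := ih i (by omega)
      have h2 : xs[i + d]'(by omega) < xs[(i + d) + 1]'(by omega) := h (i + d) (by omega)
      have h3 : xs[(i + d) + 1]'(by omega) = xs[i + (d + 1)] := by congr 1
      omega
  intro i j hi hj hij
  have := key (j - i) i (by omega)
  have e : i + (j - i) = j := by omega
  simpa [e] using this

theorem pv_rr_eq_bisect (nums : List Int) (n L R ll rr : Int)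
    (hn : n = nums.length) (hLR : L < R) (h0 : 0 ≤ L)
    (hrr1 : R ≤ rr) (hrr2 : rr ≤ n)
    (hsufp : (nums.drop R.toNat).Pairwise (fun a b => a ≤ b))
    (hinv : ∀ m : Int, R ≤ m → m < rr →
      PySem.List.pyGetD nums m 0 ≤ PySem.List.pyGetD nums ll 0) :
    pvA_rr nums n ll rr =
      R + (PySem.List.bisectRight (nums.drop R.toNat) (PySem.List.pyGetD nums ll 0) : Int) := by
  have hR : 0 ≤ R := by omega
  have hlen : ((nums.drop R.toNat).length : Int) = n - R := by
    have := List.length_drop (l := nums) (i := R.toNat); omega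
  set suf := nums.drop R.toNat with hsuf
  set x := PySem.List.pyGetD nums ll 0 with hx
  obtain ⟨hb1, hb2, hb3⟩ := PySem.List.bisectRight_spec suf x hsufp
  set k := PySem.List.bisectRight suf x with hk
  obtain ⟨ha1, ha2, ha3, ha4⟩ := pvA_rr_spec nums n ll rr
  set rr' := pvA_rr nums n ll rr with hrr'
  have hub : rr' ≤ n := by omega
  -- every index in [R, rr') has value ≤ x
  have hall : ∀ m : Int, R ≤ m → m < rr' → PySem.List.pyGetD nums m 0 ≤ x := by
    intro m hm1 hm2
    rcases (by omega : m < rr ∨ rr ≤ m) with hc | hc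
    · exact hinv m hm1 hc
    · exact ha3 m hc hm2
  by_contra hne
  rcases (by omega : rr' < R + k ∨ R + k < rr') with hc | hc
  · -- then rr' < n, and suf[rr'-R] both ≤ x (bisect) and > x (loop exit)
    have hj : ((rr' - R).toNat) < suf.length := by omega
    have hjk : (rr' - R).toNat < k := by omega
    have hle := hb2 _ hj hjk
    rw [pv_getD_drop nums R hR _ hj] at hle
    have he : R + ((rr' - R).toNat : Int) = rr' := by omega
    rw [he] at hle
    have hlt : rr' < n := by omega
    rcases ha4 with h | h
    · omega
    · omega
  · -- then k < suf.length, suf[k] > x (bisect) but index R+k < rr' has value ≤ x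
    have hj : k < suf.length := by omega
    have hgt := hb3 k hj (le_refl k)
    rw [pv_getD_drop nums R hR k hj] at hgt
    have := hall (R + k) (by omega) (by omega)
    omega

theorem pv_loop_eq (nums : List Int) (n L R ll rr ans : Int)
    (hn : n = nums.length) (hll : 0 ≤ ll) (hLR : L < R) (hL : 0 ≤ L) (hRn : R ≤ n)
    (hrr1 : R ≤ rr) (hrr2 : rr ≤ n)
    (hpre : ∀ i : Int, 0 ≤ i → i < L →
      PySem.List.pyGetD nums i 0 < PySem.List.pyGetD nums (i + 1) 0)
    (hsufp : (nums.drop R.toNat).Pairwise (fun a b => a ≤ b))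
    (hinv : ll ≤ L → ∀ m : Int, R ≤ m → m < rr →
      PySem.List.pyGetD nums m 0 ≤ PySem.List.pyGetD nums ll 0) :
    pvA_loop nums n L ll rr ans =
      ans + ((PySem.List.pyRange ll (L + 1) 1).map
        (fun i => n - (R + (PySem.List.bisectRight (nums.drop R.toNat)
          (PySem.List.pyGetD nums i 0) : Int)))).sum := by
  rw [pvA_loop]
  split
  · rename_i h
    have hbi := pv_rr_eq_bisect nums n L R ll rr hn hLR hL hrr1 hrr2 hsufp (hinv h.1)
    obtain ⟨ha1, ha2, ha3, ha4⟩ := pvA_rr_spec nums n ll rr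
    set rr' := pvA_rr nums n ll rr with hrr'
    have hub : rr' ≤ n := by omega
    have ih := pv_loop_eq nums n L R (ll + 1) rr' (ans + (n - rr'))
      hn (by omega) hLR hL hRn (by omega) hub hpre hsufp ?_
    · rw [ih, PySem.List.pyRange_one_cons (by omega : ll < L + 1)]
      simp only [List.map_cons, List.sum_cons, hbi]
      ring
    · intro hll1 m hm1 hm2
      have hstep := hpre ll hll (by omega)
      have hmle : PySem.List.pyGetD nums m 0 ≤ PySem.List.pyGetD nums ll 0 := by
        rcases (by omega : m < rr ∨ rr ≤ m) with hc | hc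
        · exact hinv h.1 m hm1 hc
        · exact ha3 m hc hm2
      omega
  · rename_i h
    have : L + 1 ≤ ll := by omega
    rw [PySem.List.pyRange_one_eq_nil (by omega)]
    simp
termination_by (L + 1 - ll).toNat
decreasing_by omega

theorem pvAB_l (nums : List Int) (n l : Int) : pvA_l nums n l = pvB_l nums n l := by
  rw [pvA_l, pvB_l]
  split
  · exact pvAB_l nums n (l + 1)
  · rfl
termination_by (n - 1 - l).toNat
decreasing_by omega

theorem pvAB_r (nums : List Int) (r : Int) : pvA_r nums r = pvB_r nums r := by
  rw [pvA_r, pvB_r]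
  split
  · exact pvAB_r nums (r - 1)
  · rfl
termination_by r.toNat
decreasing_by omega

theorem pv_main (nums : List Int) :
    incremovableSubarrayCount nums = incremovableSubarrayCount_alt nums := by
  simp only [incremovableSubarrayCount, incremovableSubarrayCount_alt]
  rw [← pvAB_l nums (nums.length : Int) 0, ← pvAB_r nums ((nums.length : Int) - 1)]
  set n : Int := (nums.length : Int) with hn
  set L := pvA_l nums n 0 with hL
  set R := pvA_r nums (n - 1) with hR
  split
  · rfl
  · rename_i hcond
    have hLR : L < R := by omega
    obtain ⟨hl1, hl2, hpre⟩ := pvA_l_spec nums n 0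
    obtain ⟨hr1, hr2, hadj⟩ := pvA_r_spec nums (n - 1)
    have hL0 : 0 ≤ L := hl1
    have hR0 : 0 ≤ R := by omega
    have hRn : R ≤ n := by
      have hnn : 0 ≤ n := by positivity
      omega
    have hslice : PySem.List.slice nums (some R) none = nums.drop R.toNat := by
      have := PySem.List.slice_from_natCast nums R.toNat
      rwa [Int.toNat_of_nonneg hR0] at this
    rw [hslice]
    have hlen : ((nums.drop R.toNat).length : Int) = n - R := by
      have := List.length_drop (l := nums) (i := R.toNat); omega
    have hsufp : (nums.drop R.toNat).Pairwise (fun a b => a ≤ b) := by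
      apply pv_pairwise_le_of_adj
      intro j hj
      have hj' : j < (nums.drop R.toNat).length := by omega
      rw [pv_getD_drop nums R hR0 j hj', pv_getD_drop nums R hR0 (j + 1) hj]
      have := hadj (R + (j : Int) + 1) (by omega) (by omega)
      have e1 : R + (j : Int) + 1 - 1 = R + (j : Int) := by ring
      have e2 : ((j + 1 : Nat) : Int) = (j : Int) + 1 := by push_cast; ring
      rw [e2, ← add_assoc]
      rw [e1] at this
      exact this
    have hloop := pv_loop_eq nums n L R 0 R 0 hn (le_refl 0) hLR hL0 hRn (le_refl R)
      (by omega) (fun i h1 h2 => hpre i h1 h2) hsufp (by intro _ m h1 h2; omega)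
    rw [hloop]
    rw [PySem.List.foldl_add]
    rw [hlen]
    simp only [sub_sub]

-- ===== VERDICT (by name: the statement is the Claim_ definition above) =====
theorem incremovableSubarrayCount_spec : Claim_equal_incremovableSubarrayCount := by
  intro nums _
  exact pv_main nums
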